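-- pv_equiv track=rewrite | github.com/oiovoyo/projecteuler | problem0035/35.py | is_number_ok
-- ===== SOURCE A (Python) =====
-- def is_number_ok(num):
-- 	check="024685"
-- 	sum = 0
-- 	if num == 2 or num == 5:
-- 		return True
-- 	for i in check:
-- 		#sum  = sum + int(i)
-- 		if str(num).find(i) != -1:
-- 			return False
-- 	return True
-- ===== SOURCE B (Python) =====
-- def is_number_ok(num):
--     if num == 2 or num == 5:
--         return True
--     n = abs(num)
--     while True:
--         if n % 10 in (0, 2, 4, 5, 6, 8):
--             return False
--         n //= 10
--         if n == 0:
--             return True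
-- ===== Notes on version B (the rewrite author's own statement) =====
-- stated objective: alternative
-- what changed: A loops over the six forbidden digit characters and rescans the decimal string str(num) with find for each; B never builds a string: it runs one arithmetic digit-extraction loop on abs(num), testing the last decimal digit against the forbidden set and then dropping it.
import Mathlib
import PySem

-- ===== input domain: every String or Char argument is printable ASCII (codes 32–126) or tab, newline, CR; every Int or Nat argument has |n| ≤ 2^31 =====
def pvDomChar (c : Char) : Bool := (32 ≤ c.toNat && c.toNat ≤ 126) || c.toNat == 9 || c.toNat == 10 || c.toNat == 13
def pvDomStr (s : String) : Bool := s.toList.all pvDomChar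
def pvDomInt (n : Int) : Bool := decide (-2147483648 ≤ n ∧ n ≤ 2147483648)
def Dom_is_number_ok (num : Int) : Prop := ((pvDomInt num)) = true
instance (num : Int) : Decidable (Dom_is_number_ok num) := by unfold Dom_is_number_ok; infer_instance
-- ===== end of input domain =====

-- B replaces A's string processing (a loop over six forbidden digit characters, each
-- rescanning str(num) with find) by pure arithmetic: one digit-extraction loop on
-- abs(num) using % 10 and // 10, never building a string (objective: alternative).

-- ===== PORT A =====
-- loop over the forbidden-digit string, rescanning str(num) with find each time
def pvLoopA : List Char → Int → Bool
  | [], _ => true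
  | c :: rest, num =>
      if PySem.Str.find (PySem.Int.toStr num) (String.ofList [c]) ≠ -1 then false
      else pvLoopA rest num

def is_number_ok (num : Int) : Bool :=
  if num == 2 || num == 5 then true
  else pvLoopA "024685".toList num

-- ===== PORT B =====
-- the while-True digit loop of Source B; n = abs(num) is nonnegative throughout, so the
-- loop is ported over Nat (n % 10 and n // 10 are exactly Nat.mod / Nat.div there)
def pvDigitLoop (n : Nat) : Bool :=
  if n % 10 == 0 || n % 10 == 2 || n % 10 == 4 || n % 10 == 5 || n % 10 == 6 || n % 10 == 8 then
    false
  else if n / 10 == 0 then true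
  else pvDigitLoop (n / 10)
termination_by n
decreasing_by
  simp_all
  omega

def is_number_ok_alt (num : Int) : Bool :=
  if num == 2 || num == 5 then true
  else pvDigitLoop num.natAbs

-- ===== PRECONDITION & SPEC =====
def Spec_is_number_ok (num : Int) (out : Bool) : Prop := out = is_number_ok_alt num
instance (num : Int) (out : Bool) : Decidable (Spec_is_number_ok num out) := by unfold Spec_is_number_ok; infer_instance

-- ===== CLAIM (what is proved, stated in full; the proofs are below) =====
def Claim_equal_is_number_ok : Prop := ∀ (num : Int), Dom_is_number_ok num → Spec_is_number_ok num (is_number_ok num)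

-- ===== LEMMAS AND PROOFS =====

-- does the decimal expansion of n contain the character c (mirrors toDigitsCore's chain)
def pvHasChar (n : Nat) (c : Char) : Bool :=
  Nat.digitChar (n % 10) == c || (if n / 10 == 0 then false else pvHasChar (n / 10) c)
termination_by n
decreasing_by
  simp_all
  omega

theorem forb_toList : "024685".toList = ['0', '2', '4', '6', '8', '5'] := by decide

theorem mem_toDigitsCore_iff (c : Char) :
    ∀ (f n : Nat) (acc : List Char), n < f →
      (c ∈ Nat.toDigitsCore 10 f n acc ↔ pvHasChar n c = true ∨ c ∈ acc) := by
  intro f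
  induction f with
  | zero => intro n acc h; omega
  | succ f ih =>
      intro n acc h
      rw [Nat.toDigitsCore]
      by_cases hq : n / 10 = 0
      · rw [if_pos hq, pvHasChar]
        simp [hq]
        rw [eq_comm]
      · have hn : 0 < n := Nat.pos_of_ne_zero (fun h0 => hq (by simp [h0]))
        have hlt : n / 10 < f := by
          have := Nat.div_lt_self hn (by norm_num : 1 < 10)
          omega
        rw [if_neg hq, ih (n / 10) (Nat.digitChar (n % 10) :: acc) hlt]
        conv_rhs => rw [pvHasChar]
        simp only [List.mem_cons, Bool.or_eq_true, beq_iff_eq, if_neg hq]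
        constructor
        · rintro (h1 | h2 | h3)
          · exact Or.inl (Or.inr h1)
          · exact Or.inl (Or.inl h2.symm)
          · exact Or.inr h3
        · rintro ((h1 | h2) | h3)
          · exact Or.inr (Or.inl h1.symm)
          · exact Or.inl h2
          · exact Or.inr (Or.inr h3)

theorem mem_toDigits_iff (c : Char) (n : Nat) :
    c ∈ Nat.toDigits 10 n ↔ pvHasChar n c = true := by
  rw [Nat.toDigits, mem_toDigitsCore_iff c (n + 1) n [] (Nat.lt_succ_self n)]
  simp

theorem digit_forb (r : Nat) (hr : r < 10) :
    ((r == 0 || r == 2 || r == 4 || r == 5 || r == 6 || r == 8) = false) ↔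
      ∀ c ∈ ['0', '2', '4', '6', '8', '5'], Nat.digitChar r ≠ c := by
  interval_cases r <;> simp [Nat.digitChar]

theorem digit_forb_mem (r : Nat) (hr : r < 10)
    (hf : (r == 0 || r == 2 || r == 4 || r == 5 || r == 6 || r == 8) = true) :
    Nat.digitChar r ∈ ['0', '2', '4', '6', '8', '5'] := by
  interval_cases r <;> revert hf <;> decide

theorem pvDigitLoop_iff (m : Nat) :
    pvDigitLoop m = true ↔ ∀ c ∈ ['0', '2', '4', '6', '8', '5'], pvHasChar m c = false := by
  induction m using Nat.strong_induction_on with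
  | _ m ih =>
      rw [pvDigitLoop]
      have hr : m % 10 < 10 := Nat.mod_lt _ (by norm_num)
      by_cases hf : (m % 10 == 0 || m % 10 == 2 || m % 10 == 4 || m % 10 == 5
          || m % 10 == 6 || m % 10 == 8) = true
      · rw [if_pos hf]
        constructor
        · intro h; exact absurd h (by simp)
        · intro h
          have hfalse := h _ (digit_forb_mem (m % 10) hr hf)
          rw [pvHasChar] at hfalse
          simp at hfalse
      · rw [if_neg hf]
        have hchar : ∀ c ∈ ['0', '2', '4', '6', '8', '5'], Nat.digitChar (m % 10) ≠ c :=
          (digit_forb (m % 10) hr).mp (by simpa using hf)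
        by_cases hq : m / 10 = 0
        · rw [if_pos (by simpa using hq : (m / 10 == 0) = true)]
          constructor
          · intro _ c hc
            rw [pvHasChar]
            simp [hchar c hc, hq]
          · intro _; rfl
        · have hlt : m / 10 < m :=
            Nat.div_lt_self (Nat.pos_of_ne_zero (fun h0 => hq (by simp [h0]))) (by norm_num)
          rw [if_neg (by simpa using hq : ¬ (m / 10 == 0) = true), ih (m / 10) hlt]
          constructor
          · intro h c hc
            rw [pvHasChar]
            simp [hchar c hc, hq, h c hc]
          · intro h c hc
            have hx := h c hc
            rw [pvHasChar] at hx
            simp [hq] at hx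
            simpa using hx.2

-- A-side characterisation (find over a singleton pattern = membership)
theorem find_single_ne_neg_one {c : Char} {num : Int} :
    PySem.Str.find (PySem.Int.toStr num) (String.ofList [c]) ≠ -1 ↔
      c ∈ (PySem.Int.toStr num).toList := by
  rw [PySem.Str.find_ne_neg_one_iff]
  simp only [String.toList_ofList]
  constructor
  · rintro ⟨s, t, h⟩
    rw [← h]; simp
  · intro h
    obtain ⟨s, t, hst⟩ := List.append_of_mem h
    exact ⟨s, t, by rw [hst]; simp⟩

theorem pvLoopA_eq_true {cs : List Char} {num : Int} :
    pvLoopA cs num = true ↔ ∀ c ∈ cs, c ∉ (PySem.Int.toStr num).toList := by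
  induction cs with
  | nil => simp [pvLoopA]
  | cons c rest ih =>
      simp only [pvLoopA]
      by_cases h : PySem.Str.find (PySem.Int.toStr num) (String.ofList [c]) ≠ -1
      · rw [if_pos h]
        have hc : c ∈ (PySem.Int.toStr num).toList := find_single_ne_neg_one.1 h
        constructor
        · intro hfalse; exact absurd hfalse (by simp)
        · intro hall; exact absurd hc (hall c (by simp))
      · have hmem : c ∉ (PySem.Int.toStr num).toList := fun hc =>
          h (find_single_ne_neg_one.2 hc)
        rw [if_neg h, ih]
        constructor
        · intro hall x hx
          rcases List.mem_cons.mp hx with rfl | hx'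
          · exact hmem
          · exact hall x hx'
        · intro hall x hx
          exact hall x (List.mem_cons_of_mem _ hx)

theorem mem_toChars_iff (c : Char) (hc : c ∈ ['0', '2', '4', '6', '8', '5']) (num : Int) :
    c ∈ (PySem.Int.toStr num).toList ↔ pvHasChar num.natAbs c = true := by
  rw [PySem.Int.toList_toStr, PySem.Int.toChars]
  by_cases hneg : num < 0
  · rw [if_pos hneg]
    have hdash : c ≠ '-' := by fin_cases hc <;> decide
    simp only [List.mem_cons]
    rw [mem_toDigits_iff]
    tauto
  · rw [if_neg hneg]
    have : num.toNat = num.natAbs := by omega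
    rw [this, mem_toDigits_iff]

-- ===== VERDICT (by name: the statement is the Claim_ definition above) =====
theorem is_number_ok_spec : Claim_equal_is_number_ok := by
  intro num _
  unfold Spec_is_number_ok is_number_ok is_number_ok_alt
  by_cases hg : (num == 2 || num == 5) = true
  · simp [hg]
  · rw [if_neg hg, if_neg hg, Bool.eq_iff_iff, forb_toList, pvLoopA_eq_true, pvDigitLoop_iff]
    constructor
    · intro h c hc
      have := h c hc
      rw [mem_toChars_iff c hc num] at this
      simpa using this
    · intro h c hc
      rw [mem_toChars_iff c hc num]
      simp [h c hc]
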